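-- pv_equiv track=rewrite | github.com/snnn1/QTSW2 | tools/diagnose_real_order_stuck.py | classify_stuck_order
-- ===== SOURCE A (Python) =====
-- def classify_stuck_order(
--     c: dict,
--     order_events: dict[str, list],
--     position: dict[str, int],
--     intent_closed: dict[str, set],
--     oco_groups: dict[str, list],
-- ) -> str:
--     """
--     Classify into A/B/C/D/E:
--     A - Legitimately waiting (valid, price not reached)
--     B - Should have been cancelled but wasn't (OCO sibling filled, position flat, etc.)
--     C - Should have been replaced but wasn't (recovery/reconciliation)
--     D - Broker state mismatch
--     E - Missing lifecycle event (fill/cancel on broker but no event)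
--     """
--     oid = c["broker_order_id"]
--     inst = c.get("instrument", "")
--     role = c.get("role", "entry")
--     intent_id = c.get("intent_id", "")
--     oco_group = c.get("oco_group", "")
--
--     evs = order_events.get(oid, [])
--     submit_ev = next((e for e in evs if (e.get("event_type") or e.get("event") or e.get("@event")) == "ORDER_SUBMIT_SUCCESS"), None)
--     fill_ev = next((e for e in evs if (e.get("event_type") or e.get("event") or e.get("@event")) == "EXECUTION_FILLED"), None)
--     cancel_ev = next((e for e in evs if (e.get("event_type") or e.get("event") or e.get("@event")) == "ORDER_CANCELLED"), None)
--     reject_ev = next((e for e in evs if (e.get("event_type") or e.get("event") or e.get("@event")) == "ORDER_REJECTED"), None)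
--
--     if fill_ev or cancel_ev or reject_ev:
--         # Event exists but order still in stuck: cancel/fill arrived after threshold (feed ordering)
--         # or event format mismatch prevented pop
--         return "E"
--
--     # B: OCO sibling filled - this order should have been cancelled by broker
--     if oco_group:
--         siblings = [x for x in oco_groups.get(oco_group, []) if x != oid]
--         for s in siblings:
--             sevs = order_events.get(s, [])
--             sf = next((e for e in sevs if (e.get("event_type") or e.get("event") or e.get("@event")) == "EXECUTION_FILLED"), None)
--             if sf:
--                 return "B"  # OCO sibling filled, this should have been cancelled
--
--     # B: Position flat but entry/protective still exists
--     pos = position.get(inst, 0)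
--     if pos == 0:
--         if role == "entry":
--             return "B"  # Position flat, entry order should not exist
--         if role in ("stop", "target"):
--             return "B"  # Position flat, protective should have been cancelled
--
--     # B: Intent closed but protective still exists
--     if role in ("stop", "target") and intent_id and intent_id in intent_closed:
--         return "B"  # Intent closed, protective should have been cancelled
--
--     # C: Hard to detect from feed - would need reconciliation/resubmit events
--     # D: Hard to detect from feed - broker state not visible
--     # Default to A: legitimately waiting (price not reached, no cancel expected)
--     return "A"
-- ===== SOURCE B (Python) =====
-- def classify_stuck_order(
--     c: dict,
--     order_events: dict[str, list],
--     position: dict[str, int],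
--     intent_closed: dict[str, set],
--     oco_groups: dict[str, list],
-- ) -> str:
--     oid = c["broker_order_id"]
--     role = c.get("role", "entry")
--     intent_id = c.get("intent_id", "")
--     oco_group = c.get("oco_group", "")
--
--     # One global pass over ALL order events, indexing which orders have a fill
--     # and which have any terminal event (fill/cancel/reject).
--     filled, terminal = set(), set()
--     for order_id, evs in order_events.items():
--         for e in evs:
--             t = e.get("event_type") or e.get("event") or e.get("@event")
--             if t == "EXECUTION_FILLED":
--                 filled.add(order_id)
--                 terminal.add(order_id)
--             elif t == "ORDER_CANCELLED" or t == "ORDER_REJECTED":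
--                 terminal.add(order_id)
--
--     # Rule table, evaluated in priority order; first hit wins, default "A".
--     rules = [
--         ("E", oid in terminal),
--         ("B", bool(oco_group)
--               and any(s in filled for s in oco_groups.get(oco_group, []) if s != oid)),
--         ("B", position.get(c.get("instrument", ""), 0) == 0
--               and role in ("entry", "stop", "target")),
--         ("B", role in ("stop", "target") and bool(intent_id)
--               and intent_id in intent_closed),
--     ]
--     return next((label for label, hit in rules if hit), "A")
-- ===== Notes on version B (the rewrite author's own statement) =====
-- stated objective: alternative
-- what changed: B inverts the data flow: instead of A's on-demand per-order scans (four next() scans over the stuck order's events plus one scan per OCO sibling), B makes one global pass over the whole order_events mapping building two indexes (orders with a fill, orders with any terminal event), then evaluates a declarative priority-ordered rule table and returns the first rule that fires, defaulting to 'A'; the dead submit_ev scan disappears.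
import Mathlib
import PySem

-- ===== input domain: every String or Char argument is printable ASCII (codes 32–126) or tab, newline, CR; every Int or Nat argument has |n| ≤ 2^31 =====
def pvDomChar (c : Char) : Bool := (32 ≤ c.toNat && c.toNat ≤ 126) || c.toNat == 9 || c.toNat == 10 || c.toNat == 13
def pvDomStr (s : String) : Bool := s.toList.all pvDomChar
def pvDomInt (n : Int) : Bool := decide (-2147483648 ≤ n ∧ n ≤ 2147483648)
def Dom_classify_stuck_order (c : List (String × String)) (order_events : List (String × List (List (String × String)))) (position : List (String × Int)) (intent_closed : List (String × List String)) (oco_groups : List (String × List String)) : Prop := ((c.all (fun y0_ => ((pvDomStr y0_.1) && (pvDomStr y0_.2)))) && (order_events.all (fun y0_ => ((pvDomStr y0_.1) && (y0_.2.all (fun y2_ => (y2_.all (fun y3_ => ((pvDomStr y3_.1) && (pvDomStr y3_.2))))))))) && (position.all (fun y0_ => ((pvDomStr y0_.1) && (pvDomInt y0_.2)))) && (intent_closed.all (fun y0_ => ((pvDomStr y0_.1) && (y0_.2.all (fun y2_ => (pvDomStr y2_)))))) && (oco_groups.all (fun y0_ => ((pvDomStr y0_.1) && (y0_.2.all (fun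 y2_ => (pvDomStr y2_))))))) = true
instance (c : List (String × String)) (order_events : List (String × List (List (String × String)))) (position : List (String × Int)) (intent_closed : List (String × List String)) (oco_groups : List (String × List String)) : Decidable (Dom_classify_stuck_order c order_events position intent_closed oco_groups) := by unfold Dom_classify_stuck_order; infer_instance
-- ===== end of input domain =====

-- ===== PORT A =====
-- B replaces A's on-demand per-order next() scans by ONE global pass over the whole
-- order_events mapping building two index sets (filled orders / terminal orders), then
-- evaluates a priority-ordered rule table, returning the first rule that fires
-- (objective: alternative decomposition; the dead submit_ev scan disappears).
-- Equivalence is about the RETURN value; neither program mutates its arguments.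

-- shared helper: (e.get("event_type") or e.get("event") or e.get("@event"))
def pyOrS (a b : Option String) : Option String :=
  match a with
  | some s => if s == "" then b else some s
  | none => b

def evKind (e : List (String × String)) : Option String :=
  pyOrS (List.lookup "event_type" e) (pyOrS (List.lookup "event" e) (List.lookup "@event" e))

def classify_stuck_order (c : List (String × String)) (order_events : List (String × List (List (String × String)))) (position : List (String × Int)) (intent_closed : List (String × List String)) (oco_groups : List (String × List String)) : String :=
  let oid := (List.lookup "broker_order_id" c).getD ""   -- c["broker_order_id"]; KeyError excluded by Pre_
  let inst := (List.lookup "instrument" c).getD ""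
  let role := (List.lookup "role" c).getD "entry"
  let intent_id := (List.lookup "intent_id" c).getD ""
  let oco_group := (List.lookup "oco_group" c).getD ""
  let evs := (List.lookup oid order_events).getD []
  let _submit_ev := evs.find? (fun e => evKind e == some "ORDER_SUBMIT_SUCCESS")
  let fill_ev := evs.find? (fun e => evKind e == some "EXECUTION_FILLED")
  let cancel_ev := evs.find? (fun e => evKind e == some "ORDER_CANCELLED")
  let reject_ev := evs.find? (fun e => evKind e == some "ORDER_REJECTED")
  if fill_ev.isSome || cancel_ev.isSome || reject_ev.isSome then "E"
  else if oco_group != "" &&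
      ((((List.lookup oco_group oco_groups).getD []).filter (fun x => x != oid)).any
        (fun s => (((List.lookup s order_events).getD []).find? (fun e => evKind e == some "EXECUTION_FILLED")).isSome)) then "B"
  else
    let pos := (List.lookup inst position).getD 0
    if pos == 0 && role == "entry" then "B"
    else if pos == 0 && (role == "stop" || role == "target") then "B"
    else if (role == "stop" || role == "target") && intent_id != "" && (List.lookup intent_id intent_closed).isSome then "B"
    else "A"

-- ===== PORT B =====
-- one event of order `k` updates the (filled, terminal) index pair
def evStep (k : String) (acc : PySem.Set String × PySem.Set String) (e : List (String × String)) : PySem.Set String × PySem.Set String :=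
  let t := evKind e
  if t == some "EXECUTION_FILLED" then (acc.1.add k, acc.2.add k)
  else if t == some "ORDER_CANCELLED" || t == some "ORDER_REJECTED" then (acc.1, acc.2.add k)
  else acc

-- the global pass over all of order_events
def indexEvents (order_events : List (String × List (List (String × String)))) : PySem.Set String × PySem.Set String :=
  order_events.foldl (fun acc p => p.2.foldl (evStep p.1) acc) (PySem.Set.empty, PySem.Set.empty)

def classify_stuck_order_alt (c : List (String × String)) (order_events : List (String × List (List (String × String)))) (position : List (String × Int)) (intent_closed : List (String × List String)) (oco_groups : List (String × List String)) : String :=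
  let oid := (List.lookup "broker_order_id" c).getD ""   -- KeyError excluded by Pre_
  let role := (List.lookup "role" c).getD "entry"
  let intent_id := (List.lookup "intent_id" c).getD ""
  let oco_group := (List.lookup "oco_group" c).getD ""
  let idx := indexEvents order_events
  let rules : List (String × Bool) :=
    [("E", idx.2.contains oid),
     ("B", oco_group != "" &&
           (((List.lookup oco_group oco_groups).getD []).any (fun s => s != oid && idx.1.contains s))),
     ("B", ((List.lookup ((List.lookup "instrument" c).getD "") position).getD 0 == 0) &&
           (role == "entry" || role == "stop" || role == "target")),
     ("B", (role == "stop" || role == "target") && intent_id != "" && (List.lookup intent_id intent_closed).isSome)]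
  ((rules.find? (fun r => r.2)).map (fun r => r.1)).getD "A"

-- ===== PRECONDITION & SPEC =====
-- Pre_ excludes (a) inputs whose config dict lacks "broker_order_id": there the Python A
-- raises KeyError (B raises too); (b) association lists with duplicate keys in
-- order_events, which no Python dict input can produce (a Lean-model-only corner where
-- first-match lookup and the global pass could disagree).
def Pre_classify_stuck_order (c : List (String × String)) (order_events : List (String × List (List (String × String)))) (position : List (String × Int)) (intent_closed : List (String × List String)) (oco_groups : List (String × List String)) : Prop :=
  (List.lookup "broker_order_id" c).isSome = true ∧ (order_events.map Prod.fst).Nodup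
instance (c : List (String × String)) (order_events : List (String × List (List (String × String)))) (position : List (String × Int)) (intent_closed : List (String × List String)) (oco_groups : List (String × List String)) : Decidable (Pre_classify_stuck_order c order_events position intent_closed oco_groups) := by unfold Pre_classify_stuck_order; infer_instance

def pvWitness_classify_stuck_order : (List (String × String)) × (List (String × List (List (String × String)))) × (List (String × Int)) × (List (String × List String)) × (List (String × List String)) :=
  ([("broker_order_id", "o1")], [("o1", [[("event_type", "ORDER_SUBMIT_SUCCESS")]])], [("ES", 1)], [], [])

def Spec_classify_stuck_order (c : List (String × String)) (order_events : List (String × List (List (String × String)))) (position : List (String × Int)) (intent_closed : List (String × List String)) (oco_groups : List (String × List String)) (out : String) : Prop := out = classify_stuck_order_alt c order_events position intent_closed oco_groups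
instance (c : List (String × String)) (order_events : List (String × List (List (String × String)))) (position : List (String × Int)) (intent_closed : List (String × List String)) (oco_groups : List (String × List String)) (out : String) : Decidable (Spec_classify_stuck_order c order_events position intent_closed oco_groups out) := by unfold Spec_classify_stuck_order; infer_instance

-- ===== CLAIM (what is proved, stated in full; the proofs are below) =====
def Claim_equal_classify_stuck_order : Prop := ∀ (c : List (String × String)) (order_events : List (String × List (List (String × String)))) (position : List (String × Int)) (intent_closed : List (String × List String)) (oco_groups : List (String × List String)), Dom_classify_stuck_order c order_events position intent_closed oco_groups → Pre_classify_stuck_order c order_events position intent_closed oco_groups → Spec_classify_stuck_order c order_events position intent_closed oco_groups (classify_stuck_order c order_events position intent_closed oco_groups)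

-- ===== LEMMAS AND PROOFS =====

-- membership after folding one order's events through evStep
lemma mem_foldl_evStep_fst (k : String) (evs : List (List (String × String))) (acc : PySem.Set String × PySem.Set String) (j : String) :
    j ∈ (evs.foldl (evStep k) acc).1 ↔ j ∈ acc.1 ∨ (j = k ∧ evs.any (fun e => evKind e == some "EXECUTION_FILLED")) := by
  induction evs generalizing acc with
  | nil => simp
  | cons e t ih =>
    simp only [List.foldl_cons, List.any_cons, evStep]
    split_ifs with h1 h2 <;>
      simp_all [PySem.Set.mem_add]

lemma mem_foldl_evStep_snd (k : String) (evs : List (List (String × String))) (acc : PySem.Set String × PySem.Set String) (j : String) :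
    j ∈ (evs.foldl (evStep k) acc).2 ↔ j ∈ acc.2 ∨ (j = k ∧ evs.any (fun e => evKind e == some "EXECUTION_FILLED" || evKind e == some "ORDER_CANCELLED" || evKind e == some "ORDER_REJECTED")) := by
  induction evs generalizing acc with
  | nil => simp
  | cons e t ih =>
    simp only [List.foldl_cons, List.any_cons, evStep]
    split_ifs with h1 h2 <;>
      simp_all [PySem.Set.mem_add]

lemma mem_indexEvents_aux (l : List (String × List (List (String × String)))) (acc : PySem.Set String × PySem.Set String) (j : String)
    (q : List (String × String) → Bool)
    (pick : PySem.Set String × PySem.Set String → PySem.Set String)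
    (hstep : ∀ (k : String) (evs : List (List (String × String))) a, j ∈ pick (evs.foldl (evStep k) a) ↔ j ∈ pick a ∨ (j = k ∧ evs.any q)) :
    j ∈ pick (l.foldl (fun a p => p.2.foldl (evStep p.1) a) acc) ↔
      j ∈ pick acc ∨ ∃ p ∈ l, p.1 = j ∧ p.2.any q := by
  induction l generalizing acc with
  | nil => simp
  | cons p t ih =>
    simp only [List.foldl_cons, ih, hstep, List.mem_cons]
    constructor
    · rintro ((h | ⟨rfl, hq⟩) | ⟨x, hx, h1, h2⟩)
      · exact Or.inl h
      · exact Or.inr ⟨p, Or.inl rfl, rfl, hq⟩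
      · exact Or.inr ⟨x, Or.inr hx, h1, h2⟩
    · rintro (h | ⟨x, hx | hx, h1, h2⟩)
      · exact Or.inl (Or.inl h)
      · subst hx; exact Or.inl (Or.inr ⟨h1.symm, h2⟩)
      · exact Or.inr ⟨x, hx, h1, h2⟩

-- under distinct keys, "some pair with key j satisfies q" = "the looked-up list satisfies q"
lemma any_key_lookup {β : Type} (l : List (String × β)) (hnd : (l.map Prod.fst).Nodup) (j : String) (q : β → Bool) (d : β) (h0 : q d = false) :
    (∃ p ∈ l, p.1 = j ∧ q p.2) ↔ q ((List.lookup j l).getD d) := by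
  induction l with
  | nil => simp [h0]
  | cons p t ih =>
    simp only [List.map_cons, List.nodup_cons] at hnd
    by_cases hj : j = p.1
    · subst hj
      simp only [List.lookup, beq_self_eq_true, Option.getD_some, List.mem_cons]
      constructor
      · rintro ⟨x, hx | hx, h1, h2⟩
        · subst hx; exact h2
        · exact absurd (h1 ▸ List.mem_map_of_mem hx) hnd.1
      · intro h; exact ⟨p, Or.inl rfl, rfl, h⟩
    · have : (j == p.1) = false := by simpa using hj
      simp only [List.lookup, this, List.mem_cons]
      rw [← ih hnd.2]
      constructor
      · rintro ⟨x, hx | hx, h1, h2⟩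
        · subst hx; exact absurd h1 (fun h => hj h.symm)
        · exact ⟨x, hx, h1, h2⟩
      · rintro ⟨x, hx, h1, h2⟩; exact ⟨x, Or.inr hx, h1, h2⟩

lemma filled_contains (l : List (String × List (List (String × String)))) (hnd : (l.map Prod.fst).Nodup) (s : String) :
    (indexEvents l).1.contains s
      = (((List.lookup s l).getD []).find? (fun e => evKind e == some "EXECUTION_FILLED")).isSome := by
  rw [Bool.eq_iff_iff, PySem.Set.contains_iff, indexEvents,
    mem_indexEvents_aux l _ s (fun e => evKind e == some "EXECUTION_FILLED") Prod.fst (fun k evs a => mem_foldl_evStep_fst k evs a s),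
    any_key_lookup l hnd s (fun evs => evs.any (fun e => evKind e == some "EXECUTION_FILLED")) [] rfl]
  simp [List.find?_isSome, List.any_eq_true, - List.find?_eq_none]

lemma terminal_contains (l : List (String × List (List (String × String)))) (hnd : (l.map Prod.fst).Nodup) (s : String) :
    (indexEvents l).2.contains s
      = ((((List.lookup s l).getD []).find? (fun e => evKind e == some "EXECUTION_FILLED")).isSome
        || (((List.lookup s l).getD []).find? (fun e => evKind e == some "ORDER_CANCELLED")).isSome
        || (((List.lookup s l).getD []).find? (fun e => evKind e == some "ORDER_REJECTED")).isSome) := by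
  rw [Bool.eq_iff_iff, PySem.Set.contains_iff, indexEvents,
    mem_indexEvents_aux l _ s _ Prod.snd (fun k evs a => mem_foldl_evStep_snd k evs a s),
    any_key_lookup l hnd s (fun evs => evs.any (fun e => evKind e == some "EXECUTION_FILLED" || evKind e == some "ORDER_CANCELLED" || evKind e == some "ORDER_REJECTED")) [] rfl]
  simp only [List.find?_isSome, List.any_eq_true, Bool.or_eq_true]
  aesop

-- evaluating the literal rule table = a chain of ifs
lemma find?_rules (b1 b2 b3 b4 : Bool) :
    ((([("E", b1), ("B", b2), ("B", b3), ("B", b4)] : List (String × Bool)).find?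
        (fun r => r.2)).map (fun r => r.1)).getD "A"
      = if b1 then "E" else if b2 then "B" else if b3 then "B" else if b4 then "B" else "A" := by
  cases b1 <;> cases b2 <;> cases b3 <;> cases b4 <;> rfl

-- ===== VERDICT (by name: the statement is the Claim_ definition above) =====
theorem classify_stuck_order_spec : Claim_equal_classify_stuck_order := by
  intro c order_events position intent_closed oco_groups _ hpre
  unfold Spec_classify_stuck_order classify_stuck_order classify_stuck_order_alt
  simp only [find?_rules, terminal_contains order_events hpre.2, filled_contains order_events hpre.2,
    List.any_filter]
  by_cases h1 : ((List.lookup ((List.lookup "broker_order_id" c).getD "") order_events).getD []).find?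
      (fun e => evKind e == some "EXECUTION_FILLED") |>.isSome <;>
  by_cases h2 : ((List.lookup ((List.lookup "broker_order_id" c).getD "") order_events).getD []).find?
      (fun e => evKind e == some "ORDER_CANCELLED") |>.isSome <;>
  by_cases h3 : ((List.lookup ((List.lookup "broker_order_id" c).getD "") order_events).getD []).find?
      (fun e => evKind e == some "ORDER_REJECTED") |>.isSome <;>
  by_cases hr1 : (List.lookup "role" c).getD "entry" == "entry" <;>
  by_cases hr2 : (List.lookup "role" c).getD "entry" == "stop" <;>
  by_cases hr3 : (List.lookup "role" c).getD "entry" == "target" <;>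
    simp [h1, h2, h3, hr1, hr2, hr3, Bool.and_comm] <;> split_ifs <;> simp_all
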